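-- pv_equiv track=rewrite | github.com/ZIB-IOL/open_loop_fw | all_functions/plotting.py | only_min
-- ===== SOURCE A (Python) =====
-- def only_min(data):
--     """
--     Replaces every entry in every list in data by the minimum up to said entry.
--
--     Args:
--         data: list of lists
--     """
--     new_data = []
--     for sub_data in data:
--         new_subdata = [sub_data[0]]
--         for i in range(1, len(sub_data)):
--             entry = sub_data[i]
--             if entry < new_subdata[-1]:
--                 new_subdata.append(entry)
--             else:
--                 new_subdata.append(new_subdata[-1])
--         new_data.append(new_subdata)
--     return new_data
-- ===== SOURCE B (Python) =====
-- def _rm(s):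
--     # divide and conquer: running minimum of s
--     if len(s) <= 1:
--         return list(s)
--     mid = len(s) // 2
--     left = _rm(s[:mid])
--     right = _rm(s[mid:])
--     m = left[-1]
--     return left + [min(m, x) for x in right]
--
-- def only_min(data):
--     return [_rm(s) for s in data]
-- ===== Notes on version B (the rewrite author's own statement) =====
-- stated objective: alternative
-- what changed: Replaces A's single left-to-right scan maintaining new_subdata[-1] with a divide-and-conquer recursion per sublist: running minima of each half are computed recursively and merged by taking min(left[-1], x) over the right half.
import Mathlib
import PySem

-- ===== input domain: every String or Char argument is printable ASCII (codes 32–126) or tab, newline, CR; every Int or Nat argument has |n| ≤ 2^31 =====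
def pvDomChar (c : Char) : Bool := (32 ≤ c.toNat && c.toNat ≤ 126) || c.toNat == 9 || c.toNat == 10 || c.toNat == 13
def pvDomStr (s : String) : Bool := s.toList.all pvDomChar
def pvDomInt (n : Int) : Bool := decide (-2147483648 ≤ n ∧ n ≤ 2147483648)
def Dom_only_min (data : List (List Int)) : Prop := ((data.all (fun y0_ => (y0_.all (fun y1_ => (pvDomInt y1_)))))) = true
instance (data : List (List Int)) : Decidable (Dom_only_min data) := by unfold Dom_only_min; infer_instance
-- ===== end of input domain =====

-- B replaces A's left-to-right scan (tracking new_subdata[-1]) by a divide-and-conquer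
-- recursion per sublist: running minima of both halves, merged with min(left[-1], x) on the
-- right half (objective: alternative algorithm, same total cost); A = B on inputs whose
-- sublists are all nonempty.
-- ===== PORT A =====
-- inner loop of A: start from [sub_data[0]], then for i in range(1, len(sub_data))
-- append sub_data[i] if it is below new_subdata[-1], else append new_subdata[-1].
-- pyGetD is exact here: every index accessed is in range on Pre_ inputs.
def onlyMinSub (sub : List Int) : List Int :=
  (PySem.List.pyRange 1 (PySem.List.len sub) 1).foldl
    (fun acc i =>
      let entry := PySem.List.pyGetD sub i 0
      let last := PySem.List.pyGetD acc (-1) 0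
      if entry < last then acc ++ [entry] else acc ++ [last])
    [PySem.List.pyGetD sub 0 0]

def only_min (data : List (List Int)) : List (List Int) :=
  data.foldl (fun new_data sub_data => new_data ++ [onlyMinSub sub_data]) []

-- ===== PORT B =====
-- _rm(s): divide and conquer; s[:mid] / s[mid:] are PySem slices, left[-1] is in range
-- whenever taken (mid ≥ 1), so pyGetD with a dummy default is exact.
def rmAlt (s : List Int) : List Int :=
  if PySem.List.len s ≤ 1 then s
  else
    let mid := PySem.Int.floordiv (PySem.List.len s) 2
    let left := rmAlt (PySem.List.slice s none (some mid))
    let right := rmAlt (PySem.List.slice s (some mid) none)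
    let m := PySem.List.pyGetD left (-1) 0
    left ++ right.map (fun x => min m x)
termination_by s.length
decreasing_by
  · rename_i hlen
    simp only [PySem.List.len_eq, not_le] at hlen
    simp only [PySem.List.len_eq]
    rw [show PySem.Int.floordiv ((s.length : Int)) 2 = ((s.length / 2 : Nat) : Int) from
      PySem.Int.floordiv_natCast s.length 2,
      PySem.List.slice_to_natCast]
    simp only [List.length_take]
    omega
  · rename_i hlen
    simp only [PySem.List.len_eq, not_le] at hlen
    simp only [PySem.List.len_eq]
    rw [show PySem.Int.floordiv ((s.length : Int)) 2 = ((s.length / 2 : Nat) : Int) from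
      PySem.Int.floordiv_natCast s.length 2,
      PySem.List.slice_from_natCast]
    simp only [List.length_drop]
    omega

def only_min_alt (data : List (List Int)) : List (List Int) :=
  data.map rmAlt

-- ===== PRECONDITION & SPEC =====
-- Pre_ excludes inputs containing an empty sublist: on those A raises IndexError (it reads
-- sub_data[0]) and returns nothing, while B naturally yields [] for that sublist.
def Pre_only_min (data : List (List Int)) : Prop := ∀ s ∈ data, s ≠ []
instance (data : List (List Int)) : Decidable (Pre_only_min data) := by unfold Pre_only_min; infer_instance
def pvWitness_only_min : List (List Int) := [[3, 1, 2], [5]]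

def Spec_only_min (data : List (List Int)) (out : List (List Int)) : Prop := out = only_min_alt data
instance (data : List (List Int)) (out : List (List Int)) : Decidable (Spec_only_min data out) := by unfold Spec_only_min; infer_instance

-- ===== CLAIM (what is proved, stated in full; the proofs are below) =====
def Claim_equal_only_min : Prop := ∀ (data : List (List Int)), Dom_only_min data → Pre_only_min data → Spec_only_min data (only_min data)

-- ===== LEMMAS AND PROOFS =====

-- reference running minimum: goMin m l takes the minima of m with the prefixes of l
def goMin (m : Int) : List Int → List Int
  | [] => []
  | x :: xs => min x m :: goMin (min x m) xs

def rmRef : List Int → List Int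
  | [] => []
  | h :: t => h :: goMin h t

-- overall minimum of m and l (the last running minimum)
def glast (m : Int) : List Int → Int
  | [] => m
  | x :: xs => glast (min x m) xs

lemma pyGetD_last (pre : List Int) (m : Int) (h : pre.getLast? = some m) :
    PySem.List.pyGetD pre (-1) 0 = m := by
  cases pre with
  | nil => simp at h
  | cons a t =>
    simp [PySem.List.pyGetD, PySem.List.pyGet?, PySem.List.pyIdx?]
    rw [List.getLast?_eq_getElem?] at h
    simp at h
    exact h

lemma getLast?_goMin (h : Int) (t : List Int) :
    (h :: goMin h t).getLast? = some (glast h t) := by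
  induction t generalizing h with
  | nil => simp [goMin, glast]
  | cons x xs ih =>
    rw [goMin, glast, List.getLast?_cons_cons]
    exact ih (min x h)

lemma goMin_map_min (l : List Int) (c m : Int) :
    (goMin m l).map (fun x => min c x) = goMin (min c m) l := by
  induction l generalizing m with
  | nil => simp [goMin]
  | cons x xs ih =>
    simp only [goMin, List.map_cons, ih (min x m)]
    have h1 : min c (min x m) = min x (min c m) := by omega
    rw [h1]

lemma goMin_append (a b : List Int) (m : Int) :
    goMin m (a ++ b) = goMin m a ++ goMin (glast m a) b := by
  induction a generalizing m with
  | nil => simp [goMin, glast]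
  | cons x xs ih => simp only [List.cons_append, goMin, glast, ih (min x m)]

lemma rmRef_map_min (ys : List Int) (m : Int) :
    (rmRef ys).map (fun x => min m x) = goMin m ys := by
  cases ys with
  | nil => simp [rmRef, goMin]
  | cons d ds =>
    simp only [rmRef, goMin, List.map_cons, goMin_map_min]
    rw [min_comm d m]

lemma rmRef_split (xs ys : List Int) (hne : xs ≠ []) :
    rmRef (xs ++ ys)
      = rmRef xs ++ (rmRef ys).map (fun x => min (PySem.List.pyGetD (rmRef xs) (-1) 0) x) := by
  cases xs with
  | nil => exact absurd rfl hne
  | cons h t =>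
    have hlast : PySem.List.pyGetD (rmRef (h :: t)) (-1) 0 = glast h t :=
      pyGetD_last _ _ (getLast?_goMin h t)
    rw [hlast]
    show rmRef ((h :: t) ++ ys) = (h :: goMin h t) ++ (rmRef ys).map (fun x => min (glast h t) x)
    rw [rmRef_map_min ys (glast h t)]
    simp only [List.cons_append, rmRef, goMin_append]

lemma rmAlt_eq_rmRef_aux : ∀ (n : Nat) (s : List Int), s.length ≤ n → rmAlt s = rmRef s := by
  intro n
  induction n with
  | zero =>
    intro s hs
    have : s = [] := List.eq_nil_of_length_eq_zero (Nat.le_zero.mp hs)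
    subst this
    rw [rmAlt]
    simp [rmRef, PySem.List.len_eq]
  | succ n ih =>
    intro s hs
    rw [rmAlt]
    by_cases h1 : PySem.List.len s ≤ 1
    · rw [if_pos h1]
      simp only [PySem.List.len_eq] at h1
      match s, h1 with
      | [], _ => rfl
      | [x], _ => simp [rmRef, goMin]
    · rw [if_neg h1]
      simp only [PySem.List.len_eq, not_le] at h1
      have hlen1 : (1:Int) < (s.length : Int) := h1
      have hlen : 2 ≤ s.length := by exact_mod_cast hlen1
      simp only [PySem.List.len_eq]
      rw [show PySem.Int.floordiv ((s.length : Int)) 2 = ((s.length / 2 : Nat) : Int) from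
        PySem.Int.floordiv_natCast s.length 2,
        PySem.List.slice_to_natCast, PySem.List.slice_from_natCast]
      have htk : (s.take (s.length / 2)).length ≤ n := by
        simp only [List.length_take]; omega
      have hdp : (s.drop (s.length / 2)).length ≤ n := by
        simp only [List.length_drop]; omega
      rw [ih _ htk, ih _ hdp]
      have hne : s.take (s.length / 2) ≠ [] := by
        intro hc
        have := congrArg List.length hc
        simp only [List.length_take, List.length_nil] at this
        omega
      rw [← rmRef_split _ _ hne, List.take_append_drop]

lemma rmAlt_eq_rmRef (s : List Int) : rmAlt s = rmRef s :=
  rmAlt_eq_rmRef_aux s.length s le_rfl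

lemma loop_eq (t : List Int) (pre : List Int) (m : Int) (h : pre.getLast? = some m) :
    t.foldl
      (fun acc x =>
        let last := PySem.List.pyGetD acc (-1) 0
        if x < last then acc ++ [x] else acc ++ [last]) pre
    = pre ++ goMin m t := by
  induction t generalizing pre m with
  | nil => simp [goMin]
  | cons x xs ih =>
    simp only [List.foldl_cons]
    have hl := pyGetD_last pre m h
    have hstep : (let last := PySem.List.pyGetD pre (-1) 0;
        if x < last then pre ++ [x] else pre ++ [last]) = pre ++ [min x m] := by
      simp only [hl]
      by_cases hc : x < m
      · simp [hc, le_of_lt hc]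
      · have : min x m = m := by omega
        simp [hc, this]
    rw [hstep, ih (pre ++ [min x m]) (min x m) (by simp), goMin]
    simp

lemma onlyMinSub_eq_rmRef (sub : List Int) (hne : sub ≠ []) :
    onlyMinSub sub = rmRef sub := by
  cases sub with
  | nil => exact absurd rfl hne
  | cons h t =>
    unfold onlyMinSub
    rw [PySem.List.len_eq]
    rw [PySem.List.foldl_pyRange_pyGetD' (h :: t) 0
      (fun acc x =>
        let last := PySem.List.pyGetD acc (-1) 0
        if x < last then acc ++ [x] else acc ++ [last])
      [PySem.List.pyGetD (h :: t) 0 0] (by omega : (0:Int) ≤ 1)]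
    have h0 : PySem.List.pyGetD (h :: t) 0 0 = h := by
      simp [PySem.List.pyGetD, PySem.List.pyGet?, PySem.List.pyIdx?]
    rw [h0]
    have : (h :: t).drop (1 : Int).toNat = t := by simp
    rw [this, loop_eq t [h] h (by simp)]
    simp [rmRef]

-- ===== VERDICT (by name: the statement is the Claim_ definition above) =====
theorem only_min_spec : Claim_equal_only_min := by
  intro data _ hpre
  unfold Spec_only_min only_min only_min_alt
  rw [PySem.List.foldl_append_singleton_eq_map]
  exact List.map_congr_left fun s hs =>
    (onlyMinSub_eq_rmRef s (hpre s hs)).trans (rmAlt_eq_rmRef s).symm
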